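-- pv_equiv track=rewrite | github.com/biodatageeks/vepyr-diffly | scripts/build_chr_cache.py | _tabix_regions
-- ===== SOURCE A (Python) =====
-- def _tabix_regions(chromosomes: list[str]) -> list[str]:
--     regions: list[str] = []
--     seen: set[str] = set()
--     for chrom in chromosomes:
--         normalized = chrom.removeprefix("chr")
--         for value in (normalized, f"chr{normalized}"):
--             if value not in seen:
--                 regions.append(value)
--                 seen.add(value)
--     return regions
-- ===== SOURCE B (Python) =====
-- def _tabix_regions(chromosomes: list[str]) -> list[str]:
--     # phase 1: flat candidate list; phase 2: reverse pass recording each value's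
--     # FIRST index (later overwrites win); phase 3: keep positions that are their
--     # value's first occurrence. No seen-set, dedup is positional.
--     values: list[str] = []
--     for chrom in chromosomes:
--         bare = chrom.removeprefix("chr")
--         values += (bare, "chr" + bare)
--     first: dict[str, int] = {}
--     for i, v in reversed(list(enumerate(values))):
--         first[v] = i
--     return [v for i, v in enumerate(values) if first[v] == i]
-- ===== Notes on version B (the rewrite author's own statement) =====
-- stated objective: alternative
-- what changed: Replaces A's single interleaved pass with a growing seen-set by three differently-shaped passes: build the flat candidate list, compute each value's first-occurrence index in one reverse overwrite pass over a dict, then keep exactly the positions that equal their value's first index.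
import Mathlib
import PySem

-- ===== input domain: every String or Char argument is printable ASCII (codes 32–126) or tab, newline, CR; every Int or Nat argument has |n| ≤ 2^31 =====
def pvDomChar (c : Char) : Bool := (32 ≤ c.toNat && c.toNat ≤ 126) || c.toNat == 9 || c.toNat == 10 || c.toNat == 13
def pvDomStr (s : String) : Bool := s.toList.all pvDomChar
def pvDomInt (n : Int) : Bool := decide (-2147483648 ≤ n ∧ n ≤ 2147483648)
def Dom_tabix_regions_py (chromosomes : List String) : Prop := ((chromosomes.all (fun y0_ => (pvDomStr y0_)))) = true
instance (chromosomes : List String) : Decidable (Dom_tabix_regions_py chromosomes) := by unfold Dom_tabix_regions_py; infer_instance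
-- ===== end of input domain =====

-- B replaces A's single pass with a growing seen-set by three differently-shaped passes:
-- flat candidate list, reverse pass recording each value's first index, positional filter
-- keeping first occurrences (alternative decomposition, not faster).


-- ===== PORT A =====
-- chrom.removeprefix("chr"): exact — drop the prefix iff the char list starts with 'c','h','r'
def pvRemoveprefixChr (s : String) : String :=
  if ['c', 'h', 'r'].isPrefixOf s.toList then String.ofList (s.toList.drop 3) else s

-- f"chr{n}" / "chr" + n: exact on the char-list representation
def pvChrCat (n : String) : String := String.ofList ('c' :: 'h' :: 'r' :: n.toList)

def tabix_regions_py (chromosomes : List String) : List String :=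
  (chromosomes.foldl
    (fun st chrom =>
      let normalized := pvRemoveprefixChr chrom
      [normalized, pvChrCat normalized].foldl
        (fun st v =>
          if PySem.Set.contains st.2 v then st
          else (st.1 ++ [v], PySem.Set.add st.2 v))
        st)
    (([] : List String), (PySem.Set.empty : PySem.Set String))).1

-- ===== PORT B =====
-- 'first[v] == i' cannot raise (every v is in 'first'); ported totally via get? = some i
def tabix_regions_py_alt (chromosomes : List String) : List String :=
  let values := chromosomes.foldl
    (fun acc chrom =>
      let bare := pvRemoveprefixChr chrom
      acc ++ [bare, pvChrCat bare]) []
  let first := (PySem.List.enumerate values 0).reverse.foldl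
    (fun d p => PySem.Dict.insert d p.2 p.1) (PySem.Dict.empty : PySem.Dict String Int)
  ((PySem.List.enumerate values 0).filter
    (fun p => PySem.Dict.get? first p.2 == some p.1)).map (fun p => p.2)

-- ===== PRECONDITION & SPEC =====
def Spec_tabix_regions_py (chromosomes : List String) (out : List String) : Prop := out = tabix_regions_py_alt chromosomes
instance (chromosomes : List String) (out : List String) : Decidable (Spec_tabix_regions_py chromosomes out) := by unfold Spec_tabix_regions_py; infer_instance

-- ===== CLAIM (what is proved, stated in full; the proofs are below) =====
def Claim_equal_tabix_regions_py : Prop := ∀ (chromosomes : List String), Dom_tabix_regions_py chromosomes → Spec_tabix_regions_py chromosomes (tabix_regions_py chromosomes)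

-- ===== LEMMAS AND PROOFS =====

-- the per-chromosome candidate pair, shared by the proofs
def pvPair (chrom : String) : List String :=
  [pvRemoveprefixChr chrom, pvChrCat (pvRemoveprefixChr chrom)]

-- A's loop keeps regions = seen; folding the dedup step over any value list from state (s, s)
-- is Set.update.
lemma pv_fold_pair (vs : List String) : ∀ (s : PySem.Set String),
    vs.foldl
      (fun st v =>
        if PySem.Set.contains st.2 v then st
        else (st.1 ++ [v], PySem.Set.add st.2 v))
      (s, s)
    = (PySem.Set.update s vs, PySem.Set.update s vs) := by
  induction vs with
  | nil => intro s; simp [PySem.Set.update]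
  | cons v vs ih =>
    intro s
    rw [List.foldl_cons, PySem.Set.update_cons]
    by_cases h : PySem.Set.contains s v
    · have hm : v ∈ s := (PySem.Set.contains_iff s v).mp h
      rw [if_pos h, PySem.Set.add_of_mem hm]
      exact ih s
    · have hm : v ∉ s := fun hmem => h ((PySem.Set.contains_iff s v).mpr hmem)
      rw [if_neg h, ← PySem.Set.add_of_not_mem hm]
      exact ih (PySem.Set.add s v)

-- A equals one Set.update over the flattened candidate list
lemma pv_A_eq_update (chromosomes : List String) :
    tabix_regions_py chromosomes
    = PySem.Set.update [] (chromosomes.flatMap pvPair) := by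
  unfold tabix_regions_py
  rw [show (fun (st : List String × PySem.Set String) chrom =>
        let normalized := pvRemoveprefixChr chrom
        [normalized, pvChrCat normalized].foldl
          (fun st v =>
            if PySem.Set.contains st.2 v then st
            else (st.1 ++ [v], PySem.Set.add st.2 v))
          st)
      = (fun st chrom =>
        (pvPair chrom).foldl
          (fun st v =>
            if PySem.Set.contains st.2 v then st
            else (st.1 ++ [v], PySem.Set.add st.2 v))
          st) from rfl,
     ← List.foldl_flatMap]
  rw [show ((PySem.Set.empty : PySem.Set String) : List String) = ([] : List String) from rfl]
  rw [pv_fold_pair]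

-- update from s prefixes s and appends the fresh part
lemma pv_update_eq_append_filter (l : List String) : ∀ (s : List String),
    PySem.Set.update s l
    = s ++ (PySem.Set.update [] l).filter (fun x => !(s.contains x)) := by
  induction l with
  | nil => intro s; simp [PySem.Set.update]
  | cons x l ih =>
    intro s
    rw [PySem.Set.update_cons, ih (PySem.Set.add s x),
        PySem.Set.update_cons ([] : List String) x l,
        ih (PySem.Set.add ([] : List String) x)]
    have hadd0 : PySem.Set.add ([] : List String) x = [x] := by
      simp [PySem.Set.add_eq_ite]
    rw [hadd0]
    by_cases hx : x ∈ s
    · rw [PySem.Set.add_of_mem hx]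
      simp only [List.filter_append]
      have h1 : ([x].filter fun y => !(s.contains y)) = [] := by
        simp [hx]
      rw [h1]
      congr 1
      rw [List.filter_filter]
      apply List.filter_congr
      intro y _
      by_cases hyx : y = x
      · subst hyx; simp [hx]
      · simp [hyx]
    · rw [PySem.Set.add_of_not_mem hx]
      simp only [List.filter_append]
      have h1 : ([x].filter fun y => !(s.contains y)) = [x] := by
        simp [hx]
      rw [h1, List.append_assoc]
      congr 2
      rw [List.filter_filter]
      apply List.filter_congr
      intro y _
      by_cases hyx : y = x
      · subst hyx; simp
      · simp [hyx, List.mem_append]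

-- B's first loop builds the flatMap of the pairs
lemma pv_foldl_values : ∀ (cs : List String) (acc : List String),
    cs.foldl (fun acc chrom => acc ++ pvPair chrom) acc
    = acc ++ cs.flatMap pvPair := by
  intro cs
  induction cs with
  | nil => intro acc; simp
  | cons c cs ih => intro acc; rw [List.foldl_cons, ih, List.flatMap_cons, List.append_assoc]

-- B's reverse dict pass: the final binding of v is the FIRST pair of ps whose snd is v
lemma pv_dict_get (ps : List (Int × String)) (v : String) :
    (ps.reverse.foldl (fun d p => PySem.Dict.insert d p.2 p.1)
      (PySem.Dict.empty : PySem.Dict String Int)).get? v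
    = (ps.find? (fun p => p.2 == v)).map (fun p => p.1) := by
  induction ps with
  | nil => simp
  | cons p ps ih =>
    rw [List.reverse_cons, List.foldl_append, List.foldl_cons, List.foldl_nil,
        PySem.Dict.get?_insert, List.find?]
    by_cases h : p.2 = v
    · simp [h]
    · have h' : (p.2 == v) = false := by simp [h]
      simp only [h', if_neg (fun hv : v = p.2 => h hv.symm)]
      exact ih

-- first index inside an enumerate, as index?
lemma pv_find_enum (vs : List String) : ∀ (s : Int) (v : String),
    ((PySem.List.enumerate vs s).find? (fun p => p.2 == v)).map (fun p => p.1)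
    = (PySem.List.index? vs v).map (fun k => s + (k : Int)) := by
  induction vs with
  | nil => intro s v; simp [PySem.List.enumerate, PySem.List.index?_eq_idxOf?]
  | cons x xs ih =>
    intro s v
    rw [PySem.List.enumerate_cons, List.find?,
        PySem.List.index?_eq_idxOf?, List.idxOf?_cons]
    by_cases h : x = v
    · simp [h]
    · have h' : (x == v) = false := by simp [h]
      rw [h', if_neg (by simp [h]), ih (s + 1) v, PySem.List.index?_eq_idxOf?]
      cases List.idxOf? v xs <;> simp <;> omega

-- the head of the candidate tail is a first occurrence iff it is fresh w.r.t. the prefix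
lemma pv_head_cond (t' : List String) (x : String) : ∀ (pre : List String),
    (((PySem.List.index? (pre ++ x :: t') x).map (fun k => (k : Int)))
      == some (pre.length : Int)) = !pre.contains x := by
  intro pre
  induction pre with
  | nil => simp [PySem.List.index?_eq_idxOf?, List.idxOf?_cons]
  | cons p pre ih =>
    rw [List.cons_append, PySem.List.index?_eq_idxOf?, List.idxOf?_cons]
    by_cases h : p = x
    · simp [h]
      omega
    · have h' : (p == x) = false := by simp [h]
      rw [if_neg (by simp [h])]
      rw [PySem.List.index?_eq_idxOf?] at ih
      have hmem : x ∈ pre ++ x :: t' := by simp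
      have hsome : (List.idxOf? x (pre ++ x :: t')).isSome := by
        simpa [List.isSome_idxOf?] using hmem
      obtain ⟨k, hk⟩ := Option.isSome_iff_exists.mp hsome
      rw [hk] at ih ⊢
      have hxp : (x == p) = false := by simp [Ne.symm h]
      simp only [List.contains_cons, hxp, Bool.false_or, List.length_cons]
      simp at ih ⊢
      rw [← ih]
      have hiff : ((k : Int) + 1 = (pre.length : Int) + 1) ↔ ((k : Int) = (pre.length : Int)) := by omega
      simp only [show ∀ a b : Int, (a == b) = decide (a = b) from fun a b => rfl]
      rw [Bool.decide_congr hiff]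

-- core: filtering the enumerate of t (offset |pre|) by first-occurrence-in-(pre++t)
-- yields exactly the fresh part of the ordered dedup of t
lemma pv_main (t : List String) : ∀ (pre : List String),
    ((PySem.List.enumerate t (pre.length : Int)).filter
      (fun p => ((PySem.List.index? (pre ++ t) p.2).map (fun k => (k : Int)))
                  == some p.1)).map (fun p => p.2)
    = (PySem.Set.update ([] : List String) t).filter (fun v => !(pre.contains v)) := by
  induction t with
  | nil => intro pre; simp [PySem.List.enumerate, PySem.Set.update]
  | cons x t' ih =>
    intro pre
    rw [PySem.List.enumerate_cons]
    have htail :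
        (PySem.List.enumerate t' ((pre.length : Int) + 1)).filter
          (fun p => ((PySem.List.index? (pre ++ x :: t') p.2).map (fun k => (k : Int)))
                      == some p.1)
        = (PySem.List.enumerate t' (((pre ++ [x]).length : Int))).filter
          (fun p => ((PySem.List.index? ((pre ++ [x]) ++ t') p.2).map (fun k => (k : Int)))
                      == some p.1) := by
      have hlist : pre ++ x :: t' = (pre ++ [x]) ++ t' := by simp
      have hlen : ((pre ++ [x]).length : Int) = (pre.length : Int) + 1 := by
        simp
      rw [hlist, hlen]
    have hupd : PySem.Set.update ([] : List String) (x :: t')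
        = x :: (PySem.Set.update ([] : List String) t').filter (fun y => !([x].contains y)) := by
      rw [PySem.Set.update_cons]
      have hax : PySem.Set.add ([] : List String) x = [x] := by simp [PySem.Set.add_eq_ite]
      rw [hax, pv_update_eq_append_filter]
      simp
    by_cases hx : x ∈ pre
    · rw [List.filter_cons_of_neg]
      swap
      · show ¬ ((((PySem.List.index? (pre ++ x :: t') x).map (fun k => (k : Int)))
          == some (pre.length : Int)) = true)
        rw [pv_head_cond]
        simp [hx]
      rw [htail, ih (pre ++ [x]), hupd, List.filter_cons_of_neg (by simp [hx])]
      rw [List.filter_filter]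
      apply List.filter_congr
      intro y _
      by_cases hyx : y = x
      · subst hyx; simp [hx]
      · simp [hyx, List.mem_append]
    · rw [List.filter_cons_of_pos]
      swap
      · show (((PySem.List.index? (pre ++ x :: t') x).map (fun k => (k : Int)))
          == some (pre.length : Int)) = true
        rw [pv_head_cond]
        simp [hx]
      rw [List.map_cons, htail, ih (pre ++ [x]), hupd,
          List.filter_cons_of_pos (by simp [hx])]
      congr 1
      rw [List.filter_filter]
      apply List.filter_congr
      intro y _
      by_cases hyx : y = x
      · subst hyx; simp
      · simp [hyx, List.mem_append]

-- B also equals that Set.update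
lemma pv_B_eq_update (chromosomes : List String) :
    tabix_regions_py_alt chromosomes
    = PySem.Set.update [] (chromosomes.flatMap pvPair) := by
  have hdef : tabix_regions_py_alt chromosomes
      = ((PySem.List.enumerate
            (chromosomes.foldl (fun acc chrom => acc ++ pvPair chrom) []) 0).filter
          (fun p => PySem.Dict.get?
            ((PySem.List.enumerate
                (chromosomes.foldl (fun acc chrom => acc ++ pvPair chrom) []) 0).reverse.foldl
              (fun d p => PySem.Dict.insert d p.2 p.1)
              (PySem.Dict.empty : PySem.Dict String Int)) p.2 == some p.1)).map
          (fun p => p.2) := rfl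
  rw [hdef, pv_foldl_values chromosomes [], List.nil_append]
  have hpred : ((PySem.List.enumerate (chromosomes.flatMap pvPair) 0).filter
      (fun p => PySem.Dict.get?
        ((PySem.List.enumerate (chromosomes.flatMap pvPair) 0).reverse.foldl
          (fun d p => PySem.Dict.insert d p.2 p.1)
          (PySem.Dict.empty : PySem.Dict String Int)) p.2 == some p.1))
      = ((PySem.List.enumerate (chromosomes.flatMap pvPair) 0).filter
      (fun p => ((PySem.List.index? (chromosomes.flatMap pvPair) p.2).map (fun k => (k : Int)))
                  == some p.1)) := by
    apply List.filter_congr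
    intro p _
    rw [pv_dict_get, pv_find_enum]
    simp
  rw [hpred]
  have h0 := pv_main (chromosomes.flatMap pvPair) []
  simp only [List.nil_append, List.length_nil, Nat.cast_zero] at h0
  rw [h0]
  simp

-- ===== VERDICT (by name: the statement is the Claim_ definition above) =====
theorem tabix_regions_py_spec : Claim_equal_tabix_regions_py := by
  intro chromosomes _
  unfold Spec_tabix_regions_py
  rw [pv_A_eq_update, pv_B_eq_update]
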